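-- pv_equiv track=rewrite | github.com/oskar-sjokvist/TI4Botten | src/game/utility.py | generate_valid_source_references
-- ===== SOURCE A (Python) =====
-- from collections import defaultdict
-- from typing import Dict, Set
--
-- def generate_valid_source_references(sources) -> Dict[str, str]:
--
--     # Build shortforms
--     valid_shortforms: Dict[str, Set[str]] = defaultdict(set)
--     for source in sources:
--         words = source.split()
--         if not words:
--             continue
--
--         # Initials in mixed, lower, and upper case
--         initials = "".join(word[0] for word in words)
--         valid_shortforms[source].update(
--             {initials, initials.lower(), initials.upper()}
--         )
--
--         # First word logic (skip "a" or "the")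
--         first_word_index = (
--             1 if words[0].lower() in {"a", "the"} and len(words) > 1 else 0
--         )
--         first_word = words[first_word_index]
--         valid_shortforms[source].update(
--             {first_word, first_word.lower(), first_word.upper()}
--         )
--
--     # Uniqueness check
--     shortform_to_sources = defaultdict(list)
--     for source, shortforms in valid_shortforms.items():
--         for sf in shortforms:
--             shortform_to_sources[sf].append(source)
--
--     # Keep only unique mappings
--     shortform_mapping = {
--         sf: srcs[0] for sf, srcs in shortform_to_sources.items() if len(srcs) == 1
--     }
--
--     # Always map full sources to themselves
--     shortform_mapping.update({src: src for src in sources})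
--
--     return shortform_mapping
-- ===== SOURCE B (Python) =====
-- def generate_valid_source_references(sources):
--     def shortforms(source):
--         words = source.split()
--         if not words:
--             return []
--         initials = "".join(word[0] for word in words)
--         idx = 1 if words[0].lower() in ("a", "the") and len(words) > 1 else 0
--         first_word = words[idx]
--         return list(dict.fromkeys(
--             [initials, initials.lower(), initials.upper(),
--              first_word, first_word.lower(), first_word.upper()]))
--
--     mapping = {}
--     conflict = set()
--     for source in dict.fromkeys(sources):
--         for sf in shortforms(source):
--             if sf in conflict:
--                 continue
--             if sf in mapping:
--                 del mapping[sf]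
--                 conflict.add(sf)
--             else:
--                 mapping[sf] = source
--     mapping.update({src: src for src in sources})
--     return mapping
-- ===== Notes on version B (the rewrite author's own statement) =====
-- stated objective: alternative
-- what changed: Replaces A's three staged passes (source->shortform-set dict, then inverted shortform->sources index, then filter to unique entries) by a single pass over the deduplicated sources that resolves uniqueness online with one mapping dict and a conflict set (first sighting assigns, second sighting deletes and blacklists).
import Mathlib
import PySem

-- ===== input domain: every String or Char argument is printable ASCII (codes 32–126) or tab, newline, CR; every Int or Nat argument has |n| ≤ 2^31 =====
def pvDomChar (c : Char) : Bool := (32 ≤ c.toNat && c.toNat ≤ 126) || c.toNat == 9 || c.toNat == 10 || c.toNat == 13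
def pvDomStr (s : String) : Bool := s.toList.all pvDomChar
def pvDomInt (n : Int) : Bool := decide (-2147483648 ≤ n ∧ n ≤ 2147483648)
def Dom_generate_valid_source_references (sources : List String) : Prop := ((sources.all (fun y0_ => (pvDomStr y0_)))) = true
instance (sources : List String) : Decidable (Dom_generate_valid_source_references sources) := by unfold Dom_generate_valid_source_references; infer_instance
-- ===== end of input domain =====

-- B resolves shortform uniqueness in ONE pass over the deduplicated sources (a mapping dict plus
-- a conflict blacklist) instead of A's three staged passes (per-source shortform sets, an inverted
-- shortform->sources index, then a filter to unique entries); same result, objective: alternative.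

-- ===== PORT A =====
-- 'word[0]' of a word produced by split() never raises (split words are nonempty), so 'headD' never
-- hits its default; ''.join of the one-character strings word[0] is String.ofList of those characters.
def generate_valid_source_references (sources : List String) : List (String × String) :=
  let valid : PySem.Dict String (PySem.Set String) :=
    sources.foldl (fun d source =>
      let words := PySem.Str.split₀ source
      if words.isEmpty then d
      else
        let initials := String.ofList (words.map (fun w => w.toList.headD ' '))
        let d := d.modify source PySem.Set.empty (fun s =>
          PySem.Set.update s [initials, PySem.Str.lower initials, PySem.Str.upper initials])
        let fwi : Nat := if (PySem.Str.lower (words.headD "") == "a"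
                            || PySem.Str.lower (words.headD "") == "the")
                            && decide (1 < words.length) then 1 else 0
        let firstWord := words.getD fwi ""
        d.modify source PySem.Set.empty (fun s =>
          PySem.Set.update s [firstWord, PySem.Str.lower firstWord, PySem.Str.upper firstWord]))
      PySem.Dict.empty
  let s2s : PySem.Dict String (List String) :=
    valid.items.foldl (fun d p =>
      p.2.foldl (fun d sf => d.modify sf [] (fun l => l ++ [p.1])) d) PySem.Dict.empty
  let mapping : PySem.Dict String String :=
    s2s.items.foldl (fun m p =>
      if p.2.length == 1 then m.insert p.1 (p.2.headD "") else m) PySem.Dict.empty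
  let idmap : PySem.Dict String String :=
    sources.foldl (fun d src => d.insert src src) PySem.Dict.empty
  (mapping.update idmap.items).items

-- ===== PORT B =====
def pvShortforms (source : String) : List String :=
  let words := PySem.Str.split₀ source
  if words.isEmpty then []
  else
    let initials := String.ofList (words.map (fun w => w.toList.headD ' '))
    let idx : Nat := if (PySem.Str.lower (words.headD "") == "a"
                        || PySem.Str.lower (words.headD "") == "the")
                        && decide (1 < words.length) then 1 else 0
    let firstWord := words.getD idx ""
    PySem.List.dedup [initials, PySem.Str.lower initials, PySem.Str.upper initials,
                      firstWord, PySem.Str.lower firstWord, PySem.Str.upper firstWord]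

def generate_valid_source_references_alt (sources : List String) : List (String × String) :=
  let core :=
    (PySem.List.dedup sources).foldl
      (fun (mc : PySem.Dict String String × PySem.Set String) source =>
        (pvShortforms source).foldl (fun mc sf =>
          if PySem.Set.contains mc.2 sf then mc
          else if mc.1.contains sf then (mc.1.erase sf, PySem.Set.add mc.2 sf)
          else (mc.1.insert sf source, mc.2)) mc)
      (PySem.Dict.empty, PySem.Set.empty)
  let mapping := core.1
  let idmap : PySem.Dict String String :=
    sources.foldl (fun d src => d.insert src src) PySem.Dict.empty
  (mapping.update idmap.items).items

-- ===== PRECONDITION & SPEC =====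
def Spec_generate_valid_source_references (sources : List String) (out : List (String × String)) : Prop := out = generate_valid_source_references_alt sources
instance (sources : List String) (out : List (String × String)) : Decidable (Spec_generate_valid_source_references sources out) := by unfold Spec_generate_valid_source_references; infer_instance

-- ===== CLAIM (what is proved, stated in full; the proofs are below) =====
def Claim_equal_generate_valid_source_references : Prop := ∀ (sources : List String), Dom_generate_valid_source_references sources → Spec_generate_valid_source_references sources (generate_valid_source_references sources)

-- ===== LEMMAS AND PROOFS =====

theorem pv_ofList_filter {α : Type} [BEq α] [LawfulBEq α] (p : α → Bool) (l : List α) :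
    PySem.Set.ofList (l.filter p) = (PySem.Set.ofList l).filter p := by
  induction l using List.reverseRecOn with
  | nil => rfl
  | append_singleton xs x ih =>
    rw [List.filter_append, PySem.Set.ofList_append_singleton]
    by_cases hp : p x = true
    · simp only [List.filter_cons, hp, if_pos, List.filter_nil, PySem.Set.ofList_append_singleton, ih]
      by_cases hx : x ∈ PySem.Set.ofList xs
      · rw [PySem.Set.add_of_mem hx, PySem.Set.add_of_mem (by simp [List.mem_filter, hx, hp])]
      · rw [PySem.Set.add_of_not_mem hx, PySem.Set.add_of_not_mem (by simp [List.mem_filter, hx]),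
          List.filter_append]
        simp [hp]
    · have hnil : List.filter p [x] = [] := by simp [hp]
      rw [hnil, List.append_nil, ih]
      by_cases hx : x ∈ PySem.Set.ofList xs
      · rw [PySem.Set.add_of_mem hx]
      · rw [PySem.Set.add_of_not_mem hx, List.filter_append, hnil, List.append_nil]

theorem pv_foldl_if_insert {κ ν β : Type} [BEq κ] (l : List β) (cnd : β → Bool) (k : β → κ)
    (v : β → ν) (m : PySem.Dict κ ν) :
    l.foldl (fun m p => if cnd p then m.insert (k p) (v p) else m) m
      = (l.filter cnd).foldl (fun m p => m.insert (k p) (v p)) m := by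
  induction l generalizing m with
  | nil => rfl
  | cons a l ih =>
    by_cases h : cnd a = true
    · simp [List.filter_cons, h, List.foldl_cons, ih]
    · simp [List.filter_cons, h, List.foldl_cons, ih]

theorem pv_insert_mem_self {κ ν : Type} [BEq κ] [LawfulBEq κ] (d : PySem.Dict κ ν) (k : κ) (v : ν)
    (h : (k, v) ∈ d.items) (hnd : d.keys.Nodup) : d.insert k v = d := by
  have hc : d.contains k = true := by
    rw [PySem.Dict.contains_iff_mem_keys]
    exact PySem.Dict.mem_keys_of_mem_items _ h
  apply PySem.Dict.ext
  rw [PySem.Dict.items_insert_of_contains _ _ hc]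
  conv_rhs => rw [show d.items = d.items.map id from (List.map_id d.items).symm]
  apply List.map_congr_left
  intro p hp
  by_cases hk : (p.1 == k) = true
  · simp only [hk, if_pos]
    have h1 : d.get? p.1 = some p.2 := PySem.Dict.get?_of_mem_items _ hp hnd
    have h2 : d.get? k = some v := PySem.Dict.get?_of_mem_items _ h hnd
    have : p.1 = k := by simpa using hk
    rw [this] at h1; rw [h1] at h2
    exact Prod.ext this.symm (by simpa using h2.symm)
  · simp [hk, id]

def pvSix (source : String) : List String :=
  let words := PySem.Str.split₀ source
  let initials := String.ofList (words.map (fun w => w.toList.headD ' '))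
  let idx : Nat := if (PySem.Str.lower (words.headD "") == "a"
                      || PySem.Str.lower (words.headD "") == "the")
                      && decide (1 < words.length) then 1 else 0
  let firstWord := words.getD idx ""
  [initials, PySem.Str.lower initials, PySem.Str.upper initials,
   firstWord, PySem.Str.lower firstWord, PySem.Str.upper firstWord]

def pvGood (source : String) : Bool := !(PySem.Str.split₀ source).isEmpty

def pvSfs (source : String) : PySem.Set String := PySem.Set.ofList (pvSix source)

theorem pv_sfs_update_sub (x : String) (L : List String) (h : ∀ y ∈ L, y ∈ pvSix x) :
    PySem.Set.update (pvSfs x) L = pvSfs x := by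
  rw [PySem.Set.update_eq_append_filter]
  have : List.filter (fun y => !(pvSfs x).contains y) (PySem.Set.ofList L) = [] := by
    rw [List.filter_eq_nil_iff]
    intro a ha
    have : a ∈ pvSfs x := (PySem.Set.mem_ofList _ _).mpr (h a ((PySem.Set.mem_ofList _ _).mp ha))
    simp [PySem.Set.contains_iff, this]
  rw [this, List.append_nil]

theorem pv_A_phase1 (sources : List String) :
    sources.foldl (fun d source =>
      let words := PySem.Str.split₀ source
      if words.isEmpty then d
      else
        let initials := String.ofList (words.map (fun w => w.toList.headD ' '))
        let d := d.modify source PySem.Set.empty (fun s =>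
          PySem.Set.update s [initials, PySem.Str.lower initials, PySem.Str.upper initials])
        let fwi : Nat := if (PySem.Str.lower (words.headD "") == "a"
                            || PySem.Str.lower (words.headD "") == "the")
                            && decide (1 < words.length) then 1 else 0
        let firstWord := words.getD fwi ""
        d.modify source PySem.Set.empty (fun s =>
          PySem.Set.update s [firstWord, PySem.Str.lower firstWord, PySem.Str.upper firstWord]))
      PySem.Dict.empty
    = PySem.Dict.mk ((PySem.Set.ofList (sources.filter pvGood)).map (fun s => (s, pvSfs s))) := by
  induction sources using List.reverseRecOn with
  | nil => rfl
  | append_singleton xs x ih =>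
    rw [List.foldl_append, ih, List.foldl_cons, List.foldl_nil, List.filter_append]
    set S := PySem.Set.ofList (xs.filter pvGood) with hS
    set d := PySem.Dict.mk (S.map (fun s => (s, pvSfs s))) with hd
    by_cases hg : pvGood x = true
    · -- good source
      have hne : (PySem.Str.split₀ x).isEmpty = false := by
        simpa [pvGood] using hg
      have hkeys : d.keys = S := by
        simp only [hd, PySem.Dict.keys_mk, List.map_map]
        exact List.map_id' S
      have hnd : d.keys.Nodup := by rw [hkeys]; exact PySem.Set.nodup_ofList _
      show (if (PySem.Str.split₀ x).isEmpty then d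
        else
          ((d.modify x PySem.Set.empty (fun s => PySem.Set.update s ((pvSix x).take 3))).modify x
            PySem.Set.empty (fun s => PySem.Set.update s ((pvSix x).drop 3)))) = _
      rw [if_neg (by simp [hne])]
      have htake : ∀ y ∈ (pvSix x).take 3, y ∈ pvSix x := fun y hy => List.mem_of_mem_take hy
      have hdrop : ∀ y ∈ (pvSix x).drop 3, y ∈ pvSix x := fun y hy => List.mem_of_mem_drop hy
      have hfx : List.filter pvGood [x] = [x] := by simp [hg]
      by_cases hx : x ∈ S
      · have hmem : (x, pvSfs x) ∈ d.items := by
          simp only [hd]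
          exact List.mem_map.mpr ⟨x, hx, rfl⟩
        have hget : d.getD x PySem.Set.empty = pvSfs x :=
          PySem.Dict.getD_of_mem_items d hmem hnd _
        have hmod : ∀ L, (∀ y ∈ L, y ∈ pvSix x) →
            d.modify x PySem.Set.empty (fun s => PySem.Set.update s L) = d := by
          intro L hL
          simp only [PySem.Dict.modify, hget, pv_sfs_update_sub x _ hL]
          exact pv_insert_mem_self d x (pvSfs x) hmem hnd
        rw [hmod _ htake, hmod _ hdrop, hfx, PySem.Set.ofList_append_singleton,
          PySem.Set.add_of_mem hx]
      · have hcon : d.contains x = false :=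
          Bool.eq_false_iff.mpr (fun hc => hx (hkeys ▸ (PySem.Dict.contains_iff_mem_keys d x).mp hc))
        have hget : d.getD x PySem.Set.empty = PySem.Set.empty :=
          PySem.Dict.getD_of_not_contains _ _ hcon
        have h1 : d.modify x PySem.Set.empty (fun s => PySem.Set.update s ((pvSix x).take 3))
            = d.insert x (PySem.Set.ofList ((pvSix x).take 3)) := by
          simp only [PySem.Dict.modify, hget]
          rfl
        rw [h1]
        have h2 : (d.insert x (PySem.Set.ofList ((pvSix x).take 3))).modify x PySem.Set.empty
            (fun s => PySem.Set.update s ((pvSix x).drop 3)) = d.insert x (pvSfs x) := by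
          simp only [PySem.Dict.modify, PySem.Dict.getD_insert_self, PySem.Dict.insert_insert_self]
          rw [← PySem.Set.ofList_append, List.take_append_drop, pvSfs]
        rw [h2]
        apply PySem.Dict.ext
        rw [PySem.Dict.items_insert_of_not_contains _ _ hcon, hfx,
          PySem.Set.ofList_append_singleton, PySem.Set.add_of_not_mem hx, List.map_append]
        rfl
    · have he : (PySem.Str.split₀ x).isEmpty = true := by simpa [pvGood] using hg
      show (if (PySem.Str.split₀ x).isEmpty then d
        else
          ((d.modify x PySem.Set.empty (fun s => PySem.Set.update s ((pvSix x).take 3))).modify x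
            PySem.Set.empty (fun s => PySem.Set.update s ((pvSix x).drop 3)))) = _
      rw [if_pos he]
      have hfx : List.filter pvGood [x] = [] := by simp [List.filter_cons, hg]
      rw [hfx, List.append_nil]

def pvPairs (sources : List String) : List (String × String) :=
  (PySem.Set.ofList (sources.filter pvGood)).flatMap
    (fun s => (pvSfs s).map (fun sf => (sf, s)))

def pvHits (P : List (String × String)) (sf : String) : List String :=
  (P.filter (fun q => q.1 == sf)).map (fun q => q.2)

def pvUniq (P : List (String × String)) : List (String × String) :=
  ((PySem.Set.ofList (P.map (fun q => q.1))).filter (fun sf => (pvHits P sf).length == 1)).map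
    (fun sf => (sf, (pvHits P sf).headD ""))

theorem pv_A_mapping (sources : List String) :
    List.foldl (fun m p => if (p.2.length == 1) = true then m.insert p.1 (p.2.headD "") else m)
      (PySem.Dict.empty : PySem.Dict String String)
      (List.foldl (fun d p => List.foldl (fun d sf => d.modify sf [] fun l => l ++ [p.1]) d p.2)
        PySem.Dict.empty
        (List.map (fun s => (s, pvSfs s)) (PySem.Set.ofList (List.filter pvGood sources)))).items
    = PySem.Dict.mk (pvUniq (pvPairs sources)) := by
  have hs2s : (List.foldl (fun d p => List.foldl (fun d sf => d.modify sf [] fun l => l ++ [p.1]) d p.2)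
        PySem.Dict.empty
        (List.map (fun s => (s, pvSfs s)) (PySem.Set.ofList (List.filter pvGood sources))))
      = List.foldl (fun d q => d.modify q.1 [] (fun l => l ++ [q.2])) PySem.Dict.empty (pvPairs sources) := by
    simp only [pvPairs, List.foldl_flatMap, List.foldl_map]
  rw [hs2s]
  set P := pvPairs sources with hP
  set s2s := List.foldl (fun d q => d.modify q.1 [] (fun l => l ++ [q.2])) PySem.Dict.empty P with hs
  have hkeys : s2s.keys = PySem.Set.ofList (P.map (fun q => q.1)) := by
    have h := PySem.Dict.keys_foldl_modify_key P (fun q => q.1) [] (fun _ q => fun l => l ++ [q.2])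
      PySem.Dict.empty
    simpa [PySem.Dict.keys_empty] using h
  have hnd : s2s.keys.Nodup := by rw [hkeys]; exact PySem.Set.nodup_ofList _
  have hget : ∀ c, s2s.getD c [] = pvHits P c := by
    intro c
    have h := PySem.Dict.getD_foldl_modify_append P (PySem.Dict.empty : PySem.Dict String (List String)) c
    simpa [pvHits, PySem.Dict.getD_empty] using h
  have hitems : s2s.items
      = (PySem.Set.ofList (P.map (fun q => q.1))).map (fun k => (k, pvHits P k)) := by
    rw [PySem.Dict.items_eq_map_keys s2s hnd [], hkeys]
    exact List.map_congr_left (fun k _ => by rw [hget])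
  have hndf : ((s2s.items.filter (fun p => p.2.length == 1)).map (fun p => p.1)).Nodup := by
    have hsub : List.Sublist ((s2s.items.filter (fun p => p.2.length == 1)).map (fun p => p.1))
        (s2s.items.map (fun p => p.1)) := List.Sublist.map _ List.filter_sublist
    exact hsub.nodup hnd
  apply PySem.Dict.ext
  rw [pv_foldl_if_insert, PySem.Dict.items_foldl_insert_fresh _ _ _ _
    (fun a _ => PySem.Dict.contains_empty _) hndf]
  rw [hitems, List.filter_map, List.map_map]
  rfl

theorem pv_hits_append (P : List (String × String)) (q : String × String) (x : String) :
    pvHits (P ++ [q]) x = pvHits P x ++ (if q.1 == x then [q.2] else []) := by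
  by_cases h : q.1 = x
  · simp [pvHits, List.filter_append, h]
  · simp [pvHits, List.filter_append, h]

theorem pv_hits_append_ne (P : List (String × String)) (q : String × String) (x : String)
    (h : x ≠ q.1) : pvHits (P ++ [q]) x = pvHits P x := by
  rw [pv_hits_append, if_neg (by simp [beq_iff_eq]; exact fun he => h he.symm), List.append_nil]

theorem pv_mem_hits (P : List (String × String)) (x : String) :
    x ∈ P.map (fun q => q.1) ↔ 1 ≤ (pvHits P x).length := by
  rw [pvHits, List.length_map, Nat.one_le_iff_ne_zero, Ne, List.length_eq_zero_iff,
    List.filter_eq_nil_iff]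
  simp

theorem pv_uniq_append_ge2 (P : List (String × String)) (q : String × String)
    (h : 2 ≤ (pvHits P q.1).length) : pvUniq (P ++ [q]) = pvUniq P := by
  have hmem : q.1 ∈ PySem.Set.ofList (P.map (fun q => q.1)) :=
    (PySem.Set.mem_ofList _ _).mpr ((pv_mem_hits P q.1).mpr (by omega))
  unfold pvUniq
  rw [List.map_append]
  simp only [List.map_cons, List.map_nil]
  rw [PySem.Set.ofList_append_singleton, PySem.Set.add_of_mem hmem]
  rw [List.filter_congr (fun x hx => ?_), List.map_congr_left (fun x hx => ?_)]
  · -- map functions agree on surviving elements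
    have hx1 : ((pvHits P x).length == 1) = true := (List.mem_filter.mp hx).2
    have hxne : x ≠ q.1 := by
      intro he; rw [he] at hx1; simp at hx1; omega
    rw [pv_hits_append_ne _ _ _ hxne]
  · -- filter conditions agree on SFS
    by_cases hxe : x = q.1
    · subst hxe
      rw [pv_hits_append]
      have hif : (if (q.1 == q.1) = true then [q.2] else []) = [q.2] := by simp
      rw [hif, List.length_append]
      have h1 : ((pvHits P q.1).length + [q.2].length == 1) = false := by
        simp only [List.length_cons, List.length_nil, beq_eq_false_iff_ne]; omega
      have h2 : ((pvHits P q.1).length == 1) = false := by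
        simp only [beq_eq_false_iff_ne]; omega
      rw [h1, h2]
    · rw [pv_hits_append_ne _ _ _ hxe]

theorem pv_uniq_append_one (P : List (String × String)) (q : String × String)
    (h : (pvHits P q.1).length = 1) :
    pvUniq (P ++ [q]) = (pvUniq P).filter (fun p => !(p.1 == q.1)) := by
  have hmem : q.1 ∈ PySem.Set.ofList (P.map (fun q => q.1)) :=
    (PySem.Set.mem_ofList _ _).mpr ((pv_mem_hits P q.1).mpr (by omega))
  unfold pvUniq
  rw [List.filter_map, List.filter_filter]
  rw [List.map_append]
  simp only [List.map_cons, List.map_nil]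
  rw [PySem.Set.ofList_append_singleton, PySem.Set.add_of_mem hmem]
  rw [List.filter_congr (fun x hx => ?_), List.map_congr_left (fun x hx => ?_)]
  · have hx2 := (List.mem_filter.mp hx).2
    rw [Bool.and_eq_true] at hx2
    have hxne : x ≠ q.1 := by
      have h1 := hx2.1
      simp only [Function.comp_apply, Bool.not_eq_eq_eq_not, Bool.not_true,
        beq_eq_false_iff_ne] at h1
      exact h1
    rw [pv_hits_append_ne _ _ _ hxne]
  · by_cases hxe : x = q.1
    · subst hxe
      rw [pv_hits_append]
      have hif : (if (q.1 == q.1) = true then [q.2] else []) = [q.2] := by simp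
      rw [hif]
      simp [h]
    · rw [pv_hits_append_ne _ _ _ hxe]
      simp [hxe]

theorem pv_uniq_append_zero (P : List (String × String)) (q : String × String)
    (h : (pvHits P q.1).length = 0) : pvUniq (P ++ [q]) = pvUniq P ++ [q] := by
  have hnil : pvHits P q.1 = [] := List.length_eq_zero_iff.mp h
  have hmem : q.1 ∉ PySem.Set.ofList (P.map (fun q => q.1)) := by
    rw [PySem.Set.mem_ofList, pv_mem_hits, h]
    omega
  unfold pvUniq
  rw [List.map_append]
  simp only [List.map_cons, List.map_nil]
  rw [PySem.Set.ofList_append_singleton, PySem.Set.add_of_not_mem hmem, List.filter_append,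
    List.map_append]
  congr 1
  · rw [List.filter_congr (fun x hx => ?_), List.map_congr_left (fun x hx => ?_)]
    · have hxne : x ≠ q.1 := by
        intro he; subst he
        exact hmem (List.mem_filter.mp hx).1
      rw [pv_hits_append_ne _ _ _ hxne]
    · by_cases hxe : x = q.1
      · subst hxe; exact absurd hx hmem
      · rw [pv_hits_append_ne _ _ _ hxe]
  · have hone : pvHits (P ++ [q]) q.1 = [q.2] := by
      rw [pv_hits_append, hnil]; simp
    rw [List.filter_cons]
    simp [hone]

theorem pv_keys_uniq (P : List (String × String)) : (PySem.Dict.mk (pvUniq P)).keys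
    = (PySem.Set.ofList (P.map (fun q => q.1))).filter (fun sf => (pvHits P sf).length == 1) := by
  rw [pvUniq, PySem.Dict.keys_mk, List.map_map]
  rw [show ((fun (x : String × String) => x.1) ∘ fun sf => (sf, (pvHits P sf).headD ""))
      = fun sf => sf from rfl]
  exact List.map_id' _

theorem pv_contains_uniq (P : List (String × String)) (x : String) :
    (PySem.Dict.mk (pvUniq P)).contains x = true ↔ (pvHits P x).length = 1 := by
  rw [PySem.Dict.contains_iff_mem_keys, pv_keys_uniq, List.mem_filter]
  constructor
  · rintro ⟨-, h⟩; simpa using h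
  · intro h
    refine ⟨?_, by simp [h]⟩
    rw [PySem.Set.mem_ofList, pv_mem_hits]; omega

theorem pv_B_core (P : List (String × String)) :
    (List.foldl (fun (mc : PySem.Dict String String × PySem.Set String) q =>
        if PySem.Set.contains mc.2 q.1 then mc
        else if mc.1.contains q.1 then (mc.1.erase q.1, PySem.Set.add mc.2 q.1)
        else (mc.1.insert q.1 q.2, mc.2))
      (PySem.Dict.empty, PySem.Set.empty) P).1 = PySem.Dict.mk (pvUniq P)
  ∧ ∀ x, x ∈ (List.foldl (fun (mc : PySem.Dict String String × PySem.Set String) q =>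
        if PySem.Set.contains mc.2 q.1 then mc
        else if mc.1.contains q.1 then (mc.1.erase q.1, PySem.Set.add mc.2 q.1)
        else (mc.1.insert q.1 q.2, mc.2))
      (PySem.Dict.empty, PySem.Set.empty) P).2 ↔ 2 ≤ (pvHits P x).length := by
  induction P using List.reverseRecOn with
  | nil =>
    constructor
    · rfl
    · intro x
      simp [pvHits, PySem.Set.empty, PySem.Dict.empty]
  | append_singleton P q ih =>
    obtain ⟨ih1, ih2⟩ := ih
    rw [List.foldl_append, List.foldl_cons, List.foldl_nil]
    set st := List.foldl (fun (mc : PySem.Dict String String × PySem.Set String) q =>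
        if PySem.Set.contains mc.2 q.1 then mc
        else if mc.1.contains q.1 then (mc.1.erase q.1, PySem.Set.add mc.2 q.1)
        else (mc.1.insert q.1 q.2, mc.2))
      (PySem.Dict.empty, PySem.Set.empty) P with hst
    rcases Nat.lt_or_ge (pvHits P q.1).length 2 with hlt | hge
    · rcases Nat.lt_or_ge (pvHits P q.1).length 1 with hlt0 | hge1
      · -- length 0 : fresh insert
        have hlen0 : (pvHits P q.1).length = 0 := by omega
        have hc2 : PySem.Set.contains st.2 q.1 = false := by
          rw [Bool.eq_false_iff]
          intro hc
          have := (ih2 q.1).mp ((PySem.Set.contains_iff _ _).mp hc)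
          omega
        have hc1 : st.1.contains q.1 = false := by
          rw [ih1, Bool.eq_false_iff]
          intro hc
          have := (pv_contains_uniq P q.1).mp hc
          omega
        rw [if_neg (by rw [hc2]; exact Bool.false_ne_true), if_neg (by rw [hc1]; exact Bool.false_ne_true)]
        constructor
        · show st.1.insert q.1 q.2 = _
          rw [ih1]
          apply PySem.Dict.ext
          rw [PySem.Dict.items_insert_of_not_contains _ _ (by rw [← ih1]; exact hc1),
            pv_uniq_append_zero P q hlen0]
        · intro x
          show x ∈ st.2 ↔ _
          by_cases hx : x = q.1
          · subst hx
            rw [ih2 q.1]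
            have h5 : pvHits (P ++ [q]) q.1 = pvHits P q.1 ++ [q.2] := by
              rw [pv_hits_append]; simp
            rw [h5, List.length_append, hlen0]
            simp
          · rw [pv_hits_append_ne _ _ _ hx]
            exact ih2 x
      · -- length 1 : erase + blacklist
        have hlen1 : (pvHits P q.1).length = 1 := by omega
        have hc2 : PySem.Set.contains st.2 q.1 = false := by
          rw [Bool.eq_false_iff]
          intro hc
          have := (ih2 q.1).mp ((PySem.Set.contains_iff _ _).mp hc)
          omega
        have hc1 : st.1.contains q.1 = true := by
          rw [ih1]
          exact (pv_contains_uniq P q.1).mpr hlen1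
        rw [if_neg (by rw [hc2]; exact Bool.false_ne_true), if_pos hc1]
        constructor
        · show st.1.erase q.1 = _
          rw [ih1]
          apply PySem.Dict.ext
          show List.filter _ (pvUniq P) = pvUniq (P ++ [q])
          rw [pv_uniq_append_one P q hlen1]
        · intro x
          show x ∈ PySem.Set.add st.2 q.1 ↔ _
          rw [PySem.Set.mem_add]
          by_cases hx : x = q.1
          · subst hx
            have h5 : pvHits (P ++ [q]) q.1 = pvHits P q.1 ++ [q.2] := by
              rw [pv_hits_append]; simp
            rw [h5, List.length_append, hlen1]
            simp
          · rw [pv_hits_append_ne _ _ _ hx]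
            simp only [hx, or_false]
            exact ih2 x
    · -- length ≥ 2 : already conflicting, skip
      have hc2 : PySem.Set.contains st.2 q.1 = true :=
        (PySem.Set.contains_iff _ _).mpr ((ih2 q.1).mpr hge)
      rw [if_pos hc2]
      constructor
      · rw [ih1, pv_uniq_append_ge2 P q hge]
      · intro x
        by_cases hx : x = q.1
        · subst hx
          have h5 : pvHits (P ++ [q]) q.1 = pvHits P q.1 ++ [q.2] := by
            rw [pv_hits_append]; simp
          rw [h5, List.length_append]
          constructor
          · intro _; omega
          · intro _; exact (ih2 q.1).mpr hge
        · rw [pv_hits_append_ne _ _ _ hx]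
          exact ih2 x


theorem pv_shortforms_eq (s : String) :
    pvShortforms s = if pvGood s then pvSfs s else [] := by
  by_cases h : (PySem.Str.split₀ s).isEmpty = true
  · simp [pvShortforms, pvGood, h]
  · simp only [Bool.not_eq_true] at h
    simp only [pvShortforms, pvGood, h, Bool.not_false, if_true, Bool.false_eq_true, if_false]
    rfl

theorem pv_foldl_skip {α σ : Type} (l : List α) (p : α → Bool) (F : σ → α → σ) (init : σ)
    (h : ∀ s x, p x = false → F s x = s) :
    l.foldl F init = (l.filter p).foldl F init := by
  induction l generalizing init with
  | nil => rfl
  | cons a l ih =>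
    by_cases hp : p a = true
    · simp [hp, ih]
    · simp [hp, ih, h init a (by simpa using hp)]

theorem pv_B_mapping (sources : List String) :
    ((PySem.List.dedup sources).foldl
      (fun (mc : PySem.Dict String String × PySem.Set String) source =>
        (pvShortforms source).foldl (fun mc sf =>
          if PySem.Set.contains mc.2 sf then mc
          else if mc.1.contains sf then (mc.1.erase sf, PySem.Set.add mc.2 sf)
          else (mc.1.insert sf source, mc.2)) mc)
      (PySem.Dict.empty, PySem.Set.empty)).1
    = PySem.Dict.mk (pvUniq (pvPairs sources)) := by
  have hskip : (PySem.List.dedup sources).foldl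
      (fun (mc : PySem.Dict String String × PySem.Set String) source =>
        (pvShortforms source).foldl (fun mc sf =>
          if PySem.Set.contains mc.2 sf then mc
          else if mc.1.contains sf then (mc.1.erase sf, PySem.Set.add mc.2 sf)
          else (mc.1.insert sf source, mc.2)) mc)
      (PySem.Dict.empty, PySem.Set.empty)
      = List.foldl (fun (mc : PySem.Dict String String × PySem.Set String) q =>
          if PySem.Set.contains mc.2 q.1 then mc
          else if mc.1.contains q.1 then (mc.1.erase q.1, PySem.Set.add mc.2 q.1)
          else (mc.1.insert q.1 q.2, mc.2))
        (PySem.Dict.empty, PySem.Set.empty) (pvPairs sources) := by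
    rw [pvPairs, List.foldl_flatMap]
    have h1 : PySem.List.dedup sources = PySem.Set.ofList sources := rfl
    rw [h1, pv_foldl_skip (PySem.Set.ofList sources) pvGood _ _
      (fun mc x hx => by rw [pv_shortforms_eq, hx]; rfl), ← pv_ofList_filter]
    apply PySem.List.foldl_congr_mem
    intro mc x hx
    have hg : pvGood x = true := by
      have := (PySem.Set.mem_ofList _ _).mp hx
      exact (List.mem_filter.mp this).2
    rw [pv_shortforms_eq, hg, if_pos rfl, List.foldl_map]
  rw [hskip]
  exact (pv_B_core (pvPairs sources)).1

-- ===== VERDICT (by name: the statement is the Claim_ definition above) =====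
theorem generate_valid_source_references_spec : Claim_equal_generate_valid_source_references := by
  intro sources _
  unfold Spec_generate_valid_source_references
  unfold generate_valid_source_references generate_valid_source_references_alt
  simp only [pv_A_phase1, pv_A_mapping, pv_B_mapping]
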